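-- pv_equiv track=rewrite | github.com/danimap27/thyroid-qml-caepia2026 | tools.py | createCouples
-- ===== SOURCE A (Python) =====
-- def createCouples(triangular_array, columns):
--     """Maps flat-array positions back to (col_i, col_j) pairs."""
--     couples, n, idx = [], len(columns), 0
--     for i in range(n):
--         for j in range(i + 1, n):
--             if idx < len(triangular_array):
--                 couples.append((columns[i], columns[j]))
--             idx += 1
--     return couples
-- ===== SOURCE B (Python) =====
-- import math
--
-- def _pair(n, total, columns, k):
--     """Invert the upper-triangular numbering: flat index k -> (columns[i], columns[j])."""
--     m = total - 1 - k
--     t = (math.isqrt(8 * m + 1) - 1) // 2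
--     i = n - 2 - t
--     off = i * (2 * n - i - 1) // 2
--     j = i + 1 + (k - off)
--     return (columns[i], columns[j])
--
-- def createCouples(triangular_array, columns):
--     """Closed-form inversion: map each flat index k directly to its (i, j) pair."""
--     n = len(columns)
--     total = n * (n - 1) // 2
--     count = min(len(triangular_array), total)
--     out = []
--     for k in range(count):
--         out.append(_pair(n, total, columns, k))
--     return out
-- ===== Notes on version B (the rewrite author's own statement) =====
-- stated objective: faster
-- what changed: Replaces the nested row/column scan (which always walks all n*(n-1)/2 index pairs and tests a counter at each) with a single loop over exactly count = min(len(triangular_array), n*(n-1)//2) flat indices, inverting the triangular numbering in closed form with math.isqrt to recover (i, j) directly.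
import Mathlib
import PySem

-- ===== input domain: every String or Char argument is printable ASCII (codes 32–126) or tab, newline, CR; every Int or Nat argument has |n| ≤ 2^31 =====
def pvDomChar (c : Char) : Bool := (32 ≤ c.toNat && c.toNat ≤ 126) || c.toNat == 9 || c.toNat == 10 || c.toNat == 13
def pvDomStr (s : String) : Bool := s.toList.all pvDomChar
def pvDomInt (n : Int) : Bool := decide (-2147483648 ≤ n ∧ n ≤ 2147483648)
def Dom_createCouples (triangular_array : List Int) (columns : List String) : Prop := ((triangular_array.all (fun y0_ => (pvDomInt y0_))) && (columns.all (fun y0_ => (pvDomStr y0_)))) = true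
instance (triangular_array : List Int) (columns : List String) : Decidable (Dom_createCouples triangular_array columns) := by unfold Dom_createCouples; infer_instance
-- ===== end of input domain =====

-- B replaces A's nested scan (always all n*(n-1)/2 index pairs) by a single loop over
-- just the min(len(triangular_array), n*(n-1)/2) emitted flat indices, inverting the
-- triangular numbering in closed form with an integer sqrt; objective: faster.

-- ===== PORT A =====
-- literal transliteration of A's nested loops with the running flat counter idx;
-- the loop variables i, j are always in range of `columns`, so `.getD ""` never fires.
def createCouples (triangular_array : List Int) (columns : List String) : List (String × String) :=
  let n : Int := columns.length
  let st :=
    (PySem.List.pyRange 0 n 1).foldl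
      (fun (st : List (String × String) × Int) i =>
        (PySem.List.pyRange (i + 1) n 1).foldl
          (fun st j =>
            (if st.2 < (triangular_array.length : Int) then
                st.1 ++ [((PySem.List.pyGet? columns i).getD "", (PySem.List.pyGet? columns j).getD "")]
              else st.1,
             st.2 + 1))
          st)
      ([], 0)
  st.1

-- ===== PORT B =====
-- B-side helper: transliteration of Source B's _pair; math.isqrt on the nonnegative
-- argument 8*m+1 is exactly Nat.sqrt of its toNat (inside B's loop m ≥ 0, so toNat is exact),
-- and the in-range indices make `.getD ""` dead code exactly as in port A.
def pairAt (n total : Int) (columns : List String) (k : Int) : String × String :=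
  let m : Int := total - 1 - k
  let t : Int := PySem.Int.floordiv (((Nat.sqrt (8 * m + 1).toNat : Int)) - 1) 2
  let i : Int := n - 2 - t
  let off : Int := PySem.Int.floordiv (i * (2 * n - i - 1)) 2
  let j : Int := i + 1 + (k - off)
  ((PySem.List.pyGet? columns i).getD "", (PySem.List.pyGet? columns j).getD "")

-- literal transliteration of Source B's createCouples
def createCouples_alt (triangular_array : List Int) (columns : List String) : List (String × String) :=
  let n : Int := columns.length
  let total : Int := PySem.Int.floordiv (n * (n - 1)) 2
  let count : Int := min (triangular_array.length : Int) total
  (PySem.List.pyRange 0 count 1).foldl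
    (fun out k => out ++ [pairAt n total columns k])
    []

-- ===== PRECONDITION & SPEC =====
def Spec_createCouples (triangular_array : List Int) (columns : List String) (out : List (String × String)) : Prop := out = createCouples_alt triangular_array columns
instance (triangular_array : List Int) (columns : List String) (out : List (String × String)) : Decidable (Spec_createCouples triangular_array columns out) := by unfold Spec_createCouples; infer_instance

-- ===== CLAIM (what is proved, stated in full; the proofs are below) =====
def Claim_equal_createCouples : Prop := ∀ (triangular_array : List Int) (columns : List String), Dom_createCouples triangular_array columns → Spec_createCouples triangular_array columns (createCouples triangular_array columns)

-- ===== LEMMAS AND PROOFS =====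

/-- number of flat positions consumed before row i of the upper triangle -/
def offN (N i : ℕ) : ℕ := i * (2 * N - i - 1) / 2

/-- total number of pairs above the diagonal -/
def TN (N : ℕ) : ℕ := N * (N - 1) / 2

lemma offN_zero (N : ℕ) : offN N 0 = 0 := by simp [offN]

lemma offN_succ (N i : ℕ) (h : i < N) : offN N (i + 1) = offN N i + (N - 1 - i) := by
  obtain ⟨u, hu⟩ : ∃ u, N = i + 1 + u := ⟨N - 1 - i, by omega⟩
  subst hu
  have h1 : 2 * (i + 1 + u) - i - 1 = i + 2 * u + 1 := by omega
  have h2 : 2 * (i + 1 + u) - (i + 1) - 1 = i + 2 * u := by omega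
  have h3 : i + 1 + u - 1 - i = u := by omega
  rw [offN, offN, h1, h2, h3]
  have e : (i + 1) * (i + 2 * u) = i * (i + 2 * u + 1) + 2 * u := by ring
  have d1 : 2 ∣ i * (i + 2 * u + 1) := by
    rcases Nat.even_or_odd i with he | ho
    · exact Dvd.dvd.mul_right he.two_dvd _
    · obtain ⟨v, hv⟩ := ho
      exact Dvd.dvd.mul_left (by omega : 2 ∣ (i + 2 * u + 1)) _
  generalize hq : (i + 1) * (i + 2 * u) = q at e ⊢
  generalize hp : i * (i + 2 * u + 1) = p at e d1 ⊢
  omega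

lemma offN_last (N : ℕ) : offN N N = TN N := by
  have h : 2 * N - N - 1 = N - 1 := by omega
  rw [offN, TN, h]

/-- what remains after row i starts: offN N i + (N-i)*((N-i)-1)/2 = TN N -/
lemma offN_total (N : ℕ) : ∀ i w, N = i + w → offN N i + w * (w - 1) / 2 = TN N := by
  intro i
  induction i with
  | zero => intro w hw; subst hw; simp [offN_zero, TN]
  | succ i ih =>
    intro w hw
    have hstep := offN_succ N i (by omega)
    have hih := ih (w + 1) (by omega)
    have h3 : N - 1 - i = w := by omega
    rw [hstep, h3]
    have h4 : (w + 1) * (w + 1 - 1) = (w + 1) * w := by simp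
    rw [h4] at hih
    have e : (w + 1) * w = w * (w - 1) + 2 * w := by
      cases w with
      | zero => rfl
      | succ v => simp only [Nat.add_sub_cancel]; ring
    have d1 : 2 ∣ w * (w - 1) := by
      rcases Nat.even_or_odd w with he | ho
      · exact Dvd.dvd.mul_right he.two_dvd _
      · obtain ⟨v, hv⟩ := ho
        exact Dvd.dvd.mul_left (by omega : 2 ∣ (w - 1)) _
    generalize hq : (w + 1) * w = q at e hih
    generalize hp : w * (w - 1) = p at e d1 ⊢
    omega

/-- integer-sqrt inversion of triangular numbers -/
lemma sqrt_inv (t m : ℕ) (h1 : t * (t + 1) / 2 ≤ m) (h2 : m < (t + 1) * (t + 2) / 2) :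
    (Nat.sqrt (8 * m + 1) - 1) / 2 = t := by
  have d1 : 2 ∣ t * (t + 1) := (Nat.even_mul_succ_self t).two_dvd
  have d2 : 2 ∣ (t + 1) * (t + 2) := (Nat.even_mul_succ_self (t + 1)).two_dvd
  have e1 : (2 * t + 1) * (2 * t + 1) = 4 * (t * (t + 1)) + 1 := by ring
  have e2 : (2 * t + 3) * (2 * t + 3) = 4 * ((t + 1) * (t + 2)) + 1 := by ring
  have lb : 2 * t + 1 ≤ Nat.sqrt (8 * m + 1) := by
    apply Nat.le_sqrt.mpr
    generalize hp : t * (t + 1) = p at d1 e1 h1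
    generalize hq : (2 * t + 1) * (2 * t + 1) = q at e1
    omega
  have ub : Nat.sqrt (8 * m + 1) < 2 * t + 3 := by
    apply Nat.sqrt_lt.mpr
    generalize hp : (t + 1) * (t + 2) = p at d2 e2 h2
    generalize hq : (2 * t + 3) * (2 * t + 3) = q at e2
    omega
  omega

/-- pairAt at flat index offN N i + d (with d inside row i) returns exactly
    the pair A produces at row i, column i+1+d -/
lemma pairAt_eq (columns : List String) (i d w : ℕ)
    (hN : columns.length = i + 1 + w) (hd : d < w) :
    pairAt (columns.length : Int) ((TN columns.length : ℕ) : Int) columns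
        ((offN columns.length i + d : ℕ) : Int)
      = ((PySem.List.pyGet? columns (i : Int)).getD "",
         (PySem.List.pyGet? columns ((i + 1 + d : ℕ) : Int)).getD "") := by
  have hw1 : 1 ≤ w := by omega
  set N := columns.length with hNdef
  have hsub : w - 1 + 1 = w := by omega
  -- nat arithmetic facts
  have htot := offN_total N i (w + 1) (by omega)
  have h4 : (w + 1) * (w + 1 - 1) = w * (w + 1) := by
    simp [Nat.mul_comm]
  rw [h4] at htot
  have dQ : 2 ∣ w * (w + 1) := (Nat.even_mul_succ_self w).two_dvd
  have dP : 2 ∣ w * (w - 1) := by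
    rcases Nat.even_or_odd w with he | ho
    · exact Dvd.dvd.mul_right he.two_dvd _
    · obtain ⟨v, hv⟩ := ho
      exact Dvd.dvd.mul_left (by omega : 2 ∣ (w - 1)) _
  have e : w * (w + 1) = w * (w - 1) + 2 * w := by
    cases w with
    | zero => rfl
    | succ v => simp only [Nat.add_sub_cancel]; ring
  have key : offN N i + d < TN N ∧
      w * (w - 1) / 2 ≤ TN N - 1 - (offN N i + d) ∧
      TN N - 1 - (offN N i + d) < w * (w + 1) / 2 := by
    generalize hp : w * (w - 1) = p at dP e
    generalize hq : w * (w + 1) = q at dQ e htot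
    omega
  have hsqrt : (Nat.sqrt (8 * (TN N - 1 - (offN N i + d)) + 1) - 1) / 2 = w - 1 := by
    apply sqrt_inv
    · rw [hsub, Nat.mul_comm]; exact key.2.1
    · rw [hsub, show w - 1 + 2 = w + 1 from by omega]; exact key.2.2
  -- now the Int computation
  simp only [pairAt]
  have hm : ((TN N : ℕ) : Int) - 1 - ((offN N i + d : ℕ) : Int)
      = ((TN N - 1 - (offN N i + d) : ℕ) : Int) := by
    have := key.1; omega
  rw [hm]
  have ht1 : (8 * ((TN N - 1 - (offN N i + d) : ℕ) : Int) + 1).toNat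
      = 8 * (TN N - 1 - (offN N i + d)) + 1 := by omega
  rw [ht1]
  have hs1 : 1 ≤ Nat.sqrt (8 * (TN N - 1 - (offN N i + d)) + 1) := by
    apply Nat.le_sqrt.mpr; omega
  have hsInt : ((Nat.sqrt (8 * (TN N - 1 - (offN N i + d)) + 1) : ℕ) : Int) - 1
      = ((Nat.sqrt (8 * (TN N - 1 - (offN N i + d)) + 1) - 1 : ℕ) : Int) := by omega
  rw [hsInt]
  have hfd1 : PySem.Int.floordiv ((Nat.sqrt (8 * (TN N - 1 - (offN N i + d)) + 1) - 1 : ℕ) : Int) 2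
      = (((Nat.sqrt (8 * (TN N - 1 - (offN N i + d)) + 1) - 1) / 2 : ℕ) : Int) := by
    exact_mod_cast PySem.Int.floordiv_natCast _ 2
  rw [hfd1, hsqrt]
  have hi' : (N : Int) - 2 - ((w - 1 : ℕ) : Int) = (i : Int) := by
    have : N = i + 1 + w := hN; omega
  rw [hi']
  have h2N : 2 * (N : Int) - (i : Int) - 1 = ((i + 2 * w + 1 : ℕ) : Int) := by
    have : N = i + 1 + w := hN; omega
  rw [h2N]
  have hprod : (i : Int) * ((i + 2 * w + 1 : ℕ) : Int) = ((i * (i + 2 * w + 1) : ℕ) : Int) := by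
    push_cast; ring
  rw [hprod]
  have hfd2 : PySem.Int.floordiv ((i * (i + 2 * w + 1) : ℕ) : Int) 2
      = ((i * (i + 2 * w + 1) / 2 : ℕ) : Int) := by
    exact_mod_cast PySem.Int.floordiv_natCast _ 2
  rw [hfd2]
  have hoffval : i * (i + 2 * w + 1) / 2 = offN N i := by
    rw [offN, show 2 * N - i - 1 = i + 2 * w + 1 from by omega]
  rw [hoffval]
  have hj : (i : Int) + 1 + (((offN N i + d : ℕ) : Int) - ((offN N i : ℕ) : Int))
      = ((i + 1 + d : ℕ) : Int) := by
    push_cast; ring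
  rw [hj]

/-- a range splits into consecutive blocks given by partial sums -/
lemma flatMap_range'_eq_range (s l : ℕ → ℕ) (h0 : s 0 = 0) :
    ∀ N, (∀ i, i < N → s (i + 1) = s i + l i) →
      (List.range N).flatMap (fun i => List.range' (s i) (l i)) = List.range (s N) := by
  intro N
  induction N with
  | zero => intro _; simp [h0]
  | succ N ih =>
    intro hs
    rw [List.range_succ, List.flatMap_append, ih (fun i hi => hs i (by omega))]
    have hone : List.flatMap (fun i => List.range' (s i) (l i)) [N] = List.range' (s N) (l N) := by
      simp
    rw [hone, hs N (by omega), List.range_eq_range', List.range_eq_range']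
    have := List.range'_append (s := 0) (m := s N) (n := l N) (step := 1)
    simpa using this

/-- the inner Python loop: append while the flat counter is below L -/
lemma fold_inner {α : Type} (L : Int) (h : Int → α) :
    ∀ (ys : List Int) (acc : List α) (idx : Int),
      ys.foldl (fun (st : List α × Int) j =>
          (if st.2 < L then st.1 ++ [h j] else st.1, st.2 + 1)) (acc, idx)
      = (acc ++ (ys.map h).take (L - idx).toNat, idx + ys.length) := by
  intro ys
  induction ys with
  | nil => intro acc idx; simp
  | cons y ys ih =>
    intro acc idx
    simp only [List.foldl_cons]
    by_cases hc : idx < L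
    · simp only [if_pos hc]
      rw [ih]
      have h1 : (L - idx).toNat = (L - (idx + 1)).toNat + 1 := by omega
      simp only [List.map_cons, h1, List.take_succ_cons, List.length_cons, Prod.mk.injEq]
      constructor
      · simp
      · push_cast; ring
    · simp only [if_neg hc]
      rw [ih]
      have h1 : (L - idx).toNat = 0 := by omega
      have h2 : (L - (idx + 1)).toNat = 0 := by omega
      simp only [h1, h2, List.take_zero, List.append_nil, List.length_cons, Prod.mk.injEq]
      refine ⟨trivial, by push_cast; ring⟩

/-- the outer Python loop: the rows concatenate and the counter keeps running -/
lemma fold_outer {α : Type} (L n : Int) (f : Int → Int → α) :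
    ∀ (is : List Int) (acc : List α) (idx : Int),
      is.foldl (fun (st : List α × Int) i =>
          (PySem.List.pyRange (i + 1) n 1).foldl
            (fun st j => (if st.2 < L then st.1 ++ [f i j] else st.1, st.2 + 1)) st)
        (acc, idx)
      = (acc ++ (is.flatMap (fun i => (PySem.List.pyRange (i + 1) n 1).map (f i))).take (L - idx).toNat,
         idx + ((is.flatMap (fun i => (PySem.List.pyRange (i + 1) n 1).map (f i))).length : Int)) := by
  intro is
  induction is with
  | nil => intro acc idx; simp
  | cons i is ih =>
    intro acc idx
    simp only [List.foldl_cons]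
    rw [fold_inner L (f i), ih]
    simp only [List.flatMap_cons, Prod.mk.injEq]
    constructor
    · rw [List.take_append, List.append_assoc]
      congr 2
      have hb : (L - idx).toNat - (List.map (f i) (PySem.List.pyRange (i + 1) n 1)).length
          = (L - (idx + ((PySem.List.pyRange (i + 1) n 1).length : Int))).toNat := by
        simp only [List.length_map]; omega
      rw [hb]
    · simp only [List.length_append, List.length_map]
      push_cast; ring

/-- A builds the first len(triangular_array) pairs of the full upper triangle -/
lemma A_char (triangular_array : List Int) (columns : List String) :
    createCouples triangular_array columns =
      ((PySem.List.pyRange 0 (columns.length : Int) 1).flatMap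
        (fun i => (PySem.List.pyRange (i + 1) (columns.length : Int) 1).map
          (fun j => ((PySem.List.pyGet? columns i).getD "",
                     (PySem.List.pyGet? columns j).getD "")))).take triangular_array.length := by
  simp only [createCouples]
  rw [fold_outer]
  simp

/-- the flat-irreducible total as floordiv equals TN -/
lemma total_eq (N : ℕ) :
    PySem.Int.floordiv ((N : Int) * ((N : Int) - 1)) 2 = ((TN N : ℕ) : Int) := by
  cases N with
  | zero => simp [TN, PySem.Int.floordiv]
  | succ M =>
    have h : ((M + 1 : ℕ) : Int) * (((M + 1 : ℕ) : Int) - 1) = (((M + 1) * M : ℕ) : Int) := by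
      push_cast; ring
    rw [h]
    have h2 : PySem.Int.floordiv (((M + 1) * M : ℕ) : Int) 2 = (((M + 1) * M / 2 : ℕ) : Int) := by
      exact_mod_cast PySem.Int.floordiv_natCast _ 2
    rw [h2]
    simp [TN]

/-- B maps pairAt over range(min(len, total)) -/
lemma B_char (triangular_array : List Int) (columns : List String) :
    createCouples_alt triangular_array columns =
      (List.range (min triangular_array.length (TN columns.length))).map
        (fun k : ℕ => pairAt (columns.length : Int) ((TN columns.length : ℕ) : Int) columns (k : Int)) := by
  unfold createCouples_alt
  rw [PySem.List.foldl_append_singleton_eq_map]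
  rw [total_eq]
  have hmin : min (triangular_array.length : Int) ((TN columns.length : ℕ) : Int)
      = ((min triangular_array.length (TN columns.length) : ℕ) : Int) := by
    push_cast; rfl
  rw [hmin, PySem.List.pyRange_zero_natCast, List.map_map]
  rfl

/-- the whole upper triangle, row by row, equals pairAt mapped over all flat indices -/
lemma allP_eq (columns : List String) :
    (PySem.List.pyRange 0 (columns.length : Int) 1).flatMap
      (fun i => (PySem.List.pyRange (i + 1) (columns.length : Int) 1).map
        (fun j => ((PySem.List.pyGet? columns i).getD "",
                   (PySem.List.pyGet? columns j).getD "")))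
    = (List.range (TN columns.length)).map
        (fun k : ℕ => pairAt (columns.length : Int) ((TN columns.length : ℕ) : Int) columns (k : Int)) := by
  set N := columns.length with hNdef
  have hblocks : (List.range N).flatMap (fun i => List.range' (offN N i) (N - 1 - i)) = List.range (TN N) := by
    have h := flatMap_range'_eq_range (offN N) (fun i => N - 1 - i) (offN_zero N) N
      (fun i hi => offN_succ N i hi)
    rw [offN_last] at h
    exact h
  rw [← hblocks, List.map_flatMap]
  rw [PySem.List.pyRange_zero_natCast, List.flatMap_map]
  apply List.flatMap_congr
  intro i hi
  have hiN : i < N := List.mem_range.mp hi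
  rw [PySem.List.pyRange_one]
  have hlen : ((N : Int) - ((i : Int) + 1)).toNat = N - 1 - i := by omega
  rw [hlen, List.map_map, List.range'_eq_map_range, List.map_map]
  apply List.map_congr_left
  intro d hd
  have hdlt : d < N - 1 - i := List.mem_range.mp hd
  have hw : N = i + 1 + (N - 1 - i) := by omega
  have hp := pairAt_eq columns i d (N - 1 - i) hw hdlt
  simp only [Function.comp]
  have hcast1 : ((i : Int) + 1 + (d : Int)) = ((i + 1 + d : ℕ) : Int) := by push_cast; ring
  rw [hcast1]
  have hcast2 : ((offN N i + d : ℕ) : Int) = (((offN N i + d : ℕ) : ℕ) : Int) := rfl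
  rw [← hp]

-- ===== VERDICT (by name: the statement is the Claim_ definition above) =====
theorem createCouples_spec : Claim_equal_createCouples := by
  intro triangular_array columns _
  unfold Spec_createCouples
  rw [A_char, allP_eq, B_char]
  rw [← List.map_take, List.take_range]
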